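-- pv_equiv track=rewrite | github.com/TheShadow29/vognet-pytorch | code/eval_fn_corr.py | compute_cons_vidf
-- ===== SOURCE A (Python) =====
-- from collections import Counter
--
-- def compute_cons_vidf(considered_list):
--     """
--     considered list: List[Dict] of required stuff
--     """
--     if len(considered_list) > 0:
--         pred_cmps = [c['pred_cmp'] for c in considered_list]
--
--         # self.pcs += pred_cmps
--         pred_cmp = Counter(pred_cmps).most_common(1)[0][0]
--         targ_cmp = considered_list[0]['targ_cmp']
--         cons = all([p == pred_cmp and p >= 0 for p in pred_cmps])
--         vid_cor = (pred_cmp == targ_cmp) and cons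
--         return int(cons), int(vid_cor)
--     else:
--         return 0, 0
-- ===== SOURCE B (Python) =====
-- def compute_cons_vidf(considered_list):
--     if not considered_list:
--         return 0, 0
--     pred_cmps = [c['pred_cmp'] for c in considered_list]
--     first = pred_cmps[0]
--     cons = all(p == first and p >= 0 for p in pred_cmps)
--     vid_cor = cons and first == considered_list[0]['targ_cmp']
--     return int(cons), int(vid_cor)
-- ===== Notes on version B (the rewrite author's own statement) =====
-- stated objective: simpler
-- what changed: Drops the Counter/most_common mode computation entirely: B compares every pred_cmp against the first one (consistency forces all elements equal, so the mode is only needed when it equals the first element anyway) and computes vid_cor from cons and the first element.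
import Mathlib
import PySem

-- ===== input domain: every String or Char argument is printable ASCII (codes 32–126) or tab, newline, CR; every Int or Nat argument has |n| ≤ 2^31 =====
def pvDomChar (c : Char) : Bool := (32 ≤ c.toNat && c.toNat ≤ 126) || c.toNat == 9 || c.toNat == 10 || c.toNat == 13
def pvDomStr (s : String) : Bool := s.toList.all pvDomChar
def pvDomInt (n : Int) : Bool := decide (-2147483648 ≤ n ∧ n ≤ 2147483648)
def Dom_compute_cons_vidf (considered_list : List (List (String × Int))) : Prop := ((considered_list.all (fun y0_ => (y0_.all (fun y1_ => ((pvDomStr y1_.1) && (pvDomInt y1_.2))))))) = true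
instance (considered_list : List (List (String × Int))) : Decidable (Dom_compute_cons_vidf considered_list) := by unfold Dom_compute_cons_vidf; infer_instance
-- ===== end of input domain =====

-- B drops A's Counter/most_common mode computation and instead compares every pred_cmp with the first one; same return value on every input where A returns.

-- ===== PORT A =====
-- c['pred_cmp'] / c['targ_cmp'] raise KeyError on a missing key; Pre_ guarantees the keys are present, so getD never takes its default.
-- most_common(1)[0][0]: first item of the counter's items sorted stably by count, descending; pred_cmps is non-empty in this branch, so headD's default is never taken.
def compute_cons_vidf (considered_list : List (List (String × Int))) : Int × Int :=
  if considered_list.length > 0 then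
    let pred_cmps := considered_list.map (fun c => (PySem.Dict.mk c).getD "pred_cmp" 0)
    let pred_cmp := ((PySem.List.sorted (PySem.Dict.counter pred_cmps).items (fun kv => kv.2) true).headD ((0:Int), (0:Int))).1
    let targ_cmp := (PySem.Dict.mk (considered_list.headD [])).getD "targ_cmp" 0
    let cons := pred_cmps.all (fun p => p == pred_cmp && decide (0 ≤ p))
    let vid_cor := (pred_cmp == targ_cmp) && cons
    ((if cons then 1 else 0), (if vid_cor then 1 else 0))
  else (0, 0)
def compute_cons_vidf_alt (considered_list : List (List (String × Int))) : Int × Int :=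
  match considered_list with
  | [] => (0, 0)
  | c0 :: _ =>
    let pred_cmps := considered_list.map (fun c => (PySem.Dict.mk c).getD "pred_cmp" 0)
    let first := pred_cmps.headD 0
    let cons := pred_cmps.all (fun p => p == first && decide (0 ≤ p))
    let vid_cor := cons && (first == (PySem.Dict.mk c0).getD "targ_cmp" 0)
    ((if cons then 1 else 0), (if vid_cor then 1 else 0))


-- ===== PRECONDITION & SPEC =====
-- Pre_ excludes exactly the inputs on which the Python A raises KeyError: some dict lacking 'pred_cmp', or a non-empty list whose first dict lacks 'targ_cmp'.
def Pre_compute_cons_vidf (considered_list : List (List (String × Int))) : Prop :=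
  (∀ c ∈ considered_list, (PySem.Dict.mk c).contains "pred_cmp" = true) ∧
  (∀ c ∈ considered_list.take 1, (PySem.Dict.mk c).contains "targ_cmp" = true)
instance (considered_list : List (List (String × Int))) : Decidable (Pre_compute_cons_vidf considered_list) := by unfold Pre_compute_cons_vidf; infer_instance
def pvWitness_compute_cons_vidf : (List (List (String × Int))) := [[("pred_cmp", 1), ("targ_cmp", 1)]]

def Spec_compute_cons_vidf (considered_list : List (List (String × Int))) (out : Int × Int) : Prop := out = compute_cons_vidf_alt considered_list
instance (considered_list : List (List (String × Int))) (out : Int × Int) : Decidable (Spec_compute_cons_vidf considered_list out) := by unfold Spec_compute_cons_vidf; infer_instance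

-- ===== CLAIM (what is proved, stated in full; the proofs are below) =====
def Claim_equal_compute_cons_vidf : Prop := ∀ (considered_list : List (List (String × Int))), Dom_compute_cons_vidf considered_list → Pre_compute_cons_vidf considered_list → Spec_compute_cons_vidf considered_list (compute_cons_vidf considered_list)

-- ===== LEMMAS AND PROOFS =====

theorem eq_singleton_of_nodup_of_all_eq {α : Type} (L : List α) (f : α)
    (hn : L.Nodup) (hf : f ∈ L) (h : ∀ x ∈ L, x = f) : L = [f] := by
  cases L with
  | nil => cases hf
  | cons a t =>
    have ha : a = f := h a (List.mem_cons_self)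
    subst ha
    cases t with
    | nil => rfl
    | cons b u =>
      have hb : b = a := h b (by simp)
      simp [List.nodup_cons, hb] at hn

theorem mode_of_all_eq (ps : List Int) (f : Int)
    (hf : f ∈ ps) (h : ∀ p ∈ ps, p = f) :
    ((PySem.List.sorted (PySem.Dict.counter ps).items (fun kv => kv.2) true).headD ((0:Int), (0:Int))).1 = f := by
  have hset : PySem.Set.ofList ps = [f] :=
    eq_singleton_of_nodup_of_all_eq _ f (PySem.Set.nodup_ofList ps)
      ((PySem.Set.mem_ofList ..).2 hf) (fun x hx => h x ((PySem.Set.mem_ofList ..).1 hx))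
  rw [PySem.Dict.items_counter, hset]
  have hs : PySem.List.sorted [(f, (ps.count f : Int))] (fun kv => kv.2) true = [(f, (ps.count f : Int))] :=
    PySem.List.sorted_rev_eq_self_of_pairwise _ _ (by simp)
  simp [hs]

theorem ports_agree : ∀ (l : List (List (String × Int))), compute_cons_vidf l = compute_cons_vidf_alt l := by
  intro l
  cases l with
  | nil => rfl
  | cons c0 rest =>
    simp only [compute_cons_vidf, compute_cons_vidf_alt, List.length_cons, List.headD_cons]
    set g : List (String × Int) → Int := fun c => (PySem.Dict.mk c).getD "pred_cmp" 0 with hg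
    set ps : List Int := (c0 :: rest).map g with hps
    set f : Int := g c0 with hf
    have hhead : ps.headD 0 = f := by simp only [hps, List.map_cons, List.headD_cons]; exact hf.symm
    have hfm : f ∈ ps := by rw [hps, hf]; exact List.mem_map_of_mem List.mem_cons_self
    by_cases hall : ∀ p ∈ ps, p = f
    · have hm := mode_of_all_eq ps f hfm hall
      simp only [if_pos (by omega : 0 < rest.length + 1), hm, hhead]
      simp [Bool.and_comm]
    · push Not at hall
      obtain ⟨p, hp, hpne⟩ := hall
      have hconsB : ps.all (fun q => q == f && decide (0 ≤ q)) = false := by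
        simp only [List.all_eq_false]
        exact ⟨p, hp, by simp [hpne]⟩
      set m : Int := ((PySem.List.sorted (PySem.Dict.counter ps).items (fun kv => kv.2) true).headD ((0:Int), (0:Int))).1 with hmdef
      have hconsA : ps.all (fun q => q == m && decide (0 ≤ q)) = false := by
        by_contra hc
        have ht : ps.all (fun q => q == m && decide (0 ≤ q)) = true :=
          by revert hc; cases ps.all (fun q => q == m && decide (0 ≤ q)) <;> simp
        rw [List.all_eq_true] at ht
        have h1 := ht f hfm
        have h2 := ht p hp
        simp at h1 h2
        exact hpne (h2.1.trans h1.1.symm)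
      simp only [if_pos (by omega : 0 < rest.length + 1), hhead]
      simp [hconsA, hconsB]

-- ===== VERDICT (by name: the statement is the Claim_ definition above) =====
theorem compute_cons_vidf_spec : Claim_equal_compute_cons_vidf := by
  intro l _ _
  exact ports_agree l
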